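-- pv_equiv track=rewrite | github.com/mratet/advent-of-code_python | i18n_solutions/day_18.py | find_longest_segments
-- ===== SOURCE A (Python) =====
-- from itertools import groupby
--
-- def find_longest_segments(levels):
--     result = {level: (0, 0) for level in set(levels)}
--     position = 0
--     for level, group in groupby(levels):
--         length_group = len(list(group))
--         if length_group > result[level][1]:
--             result[level] = (position, length_group)
--         position += length_group
--     return result
-- ===== SOURCE B (Python) =====
-- def find_longest_segments(levels):
--     result = {}
--     for level in set(levels):
--         best, run = (0, 0), 0
--         for i, x in enumerate(levels):
--             run = run + 1 if x == level else 0
--             if run > best[1]: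
--                 best = (i - run + 1, run)
--         result[level] = best
--     return result
-- ===== Notes on version B (the rewrite author's own statement) =====
-- stated objective: alternative
-- what changed: Replaces the single groupby pass updating a shared dict with a per-level brute-force strategy: for each distinct level, an independent full scan with a reset-on-mismatch run counter computes that level's earliest longest run directly.
import Mathlib
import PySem

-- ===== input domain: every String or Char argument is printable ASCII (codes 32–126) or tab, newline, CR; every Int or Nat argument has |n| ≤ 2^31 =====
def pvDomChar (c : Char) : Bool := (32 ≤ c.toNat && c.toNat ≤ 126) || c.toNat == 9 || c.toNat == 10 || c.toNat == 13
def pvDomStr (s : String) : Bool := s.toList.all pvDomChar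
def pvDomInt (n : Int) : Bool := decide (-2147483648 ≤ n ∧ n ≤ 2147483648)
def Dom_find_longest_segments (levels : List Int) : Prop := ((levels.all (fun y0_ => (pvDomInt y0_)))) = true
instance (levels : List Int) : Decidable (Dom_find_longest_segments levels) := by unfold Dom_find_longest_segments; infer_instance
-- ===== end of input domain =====

-- B replaces the single groupby pass over a shared dict with an independent full scan per distinct
-- level (reset-on-mismatch run counter), an O(n·k) brute-force alternative of different shape.
-- Python dicts are association lists here; A iterates set(levels) only to build a dict that is later
-- looked up, so its CPython hash order is not part of the compared value (dicts compared ignoring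
-- order); both ports use first-occurrence order.

-- ===== PORT A =====
-- groupby(levels) is ported as head-run splitting: the first group is x :: takeWhile (== x) xs,
-- the rest is dropWhile (== x) xs; len(list(group)) is the group's length.
def pyALoop (d : PySem.Dict Int (Int × Int)) (pos : Int) (levels : List Int) :
    PySem.Dict Int (Int × Int) :=
  match levels with
  | [] => d
  | x :: xs =>
    let len : Int := ((1 + (xs.takeWhile (fun y => y == x)).length : Nat) : Int)
    let d' := if len > (d.getD x ((0 : Int), (0 : Int))).2 then d.insert x (pos, len) else d
    pyALoop d' (pos + len) (xs.dropWhile (fun y => y == x))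
termination_by levels.length
decreasing_by simpa using Nat.lt_succ_of_le (List.length_dropWhile_le _ _)

def find_longest_segments (levels : List Int) : List (Int × Int × Int) :=
  (pyALoop
    ((PySem.Set.ofList levels).foldl
      (fun d l => d.insert l ((0 : Int), (0 : Int))) PySem.Dict.empty)
    0 levels).items

-- ===== PORT B =====
-- Source B's inner loop body: run = run + 1 if x == level else 0; update best when run > best[1]
def pyBStep (level : Int) (st : (Int × Int) × Int) (p : Int × Int) : (Int × Int) × Int :=
  let run : Int := if p.2 == level then st.2 + 1 else 0
  if run > st.1.2 then ((p.1 - run + 1, run), run) else (st.1, run)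

-- Source B's inner scan for one level: fold over enumerate(levels) with state (best, run)
def pyBBest (levels : List Int) (level : Int) : Int × Int :=
  ((PySem.List.enumerate levels 0).foldl (pyBStep level) ((((0 : Int), (0 : Int)), (0 : Int)))).1

def find_longest_segments_alt (levels : List Int) : List (Int × Int × Int) :=
  ((PySem.Set.ofList levels).foldl
    (fun d l => d.insert l (pyBBest levels l)) PySem.Dict.empty).items

-- ===== PRECONDITION & SPEC =====
def Spec_find_longest_segments (levels : List Int) (out : List (Int × Int × Int)) : Prop := out = find_longest_segments_alt levels
instance (levels : List Int) (out : List (Int × Int × Int)) : Decidable (Spec_find_longest_segments levels out) := by unfold Spec_find_longest_segments; infer_instance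

-- ===== CLAIM (what is proved, stated in full; the proofs are below) =====
def Claim_equal_find_longest_segments : Prop := ∀ (levels : List Int), Dom_find_longest_segments levels → Spec_find_longest_segments levels (find_longest_segments levels)

-- ===== LEMMAS AND PROOFS =====

-- A's loop projected to a single key k (proof-only helper)
def aKey (k : Int) (pos : Int) (best : Int × Int) (levels : List Int) : Int × Int :=
  match levels with
  | [] => best
  | x :: xs =>
    let len : Int := ((1 + (xs.takeWhile (fun y => y == x)).length : Nat) : Int)
    aKey k (pos + len) (if x = k ∧ len > best.2 then (pos, len) else best)
      (xs.dropWhile (fun y => y == x))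
termination_by levels.length
decreasing_by simpa using Nat.lt_succ_of_le (List.length_dropWhile_le _ _)

-- the first group of levels is a constant run
lemma takeWhile_eq_replicate (x : Int) (xs : List Int) :
    xs.takeWhile (fun y => y == x) = List.replicate (xs.takeWhile (fun y => y == x)).length x := by
  rw [List.eq_replicate_iff]
  exact ⟨rfl, fun b hb => by simpa using List.mem_takeWhile_imp hb⟩

lemma head?_dropWhile_ne (x : Int) : ∀ (xs : List Int), ∀ z,
    (xs.dropWhile (fun y => y == x)).head? = some z → z ≠ x
  | [], z => by simp
  | a :: xs, z => by
      by_cases h : a == x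
      · simpa [List.dropWhile_cons, h] using head?_dropWhile_ne x xs z
      · intro hz hzx
        subst hzx
        simp [h] at hz
        exact absurd (by simp [hz]) h

-- A's dict loop, per key: getD projects to aKey
lemma getD_pyALoop (n : Nat) : ∀ (levels : List Int), levels.length ≤ n →
    ∀ (d : PySem.Dict Int (Int × Int)) (pos k : Int),
    (pyALoop d pos levels).getD k ((0 : Int), (0 : Int))
      = aKey k pos (d.getD k ((0 : Int), (0 : Int))) levels := by
  induction n with
  | zero =>
      intro levels hlen d pos k
      have : levels = [] := by cases levels with
        | nil => rfl
        | cons a l => simp at hlen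
      subst this; simp [pyALoop, aKey]
  | succ n ih =>
      intro levels hlen d pos k
      match levels with
      | [] => simp [pyALoop, aKey]
      | x :: xs =>
        rw [pyALoop, aKey]
        have hrlen : (xs.dropWhile (fun y => y == x)).length ≤ n := by
          have := List.length_dropWhile_le (fun y => y == x) xs
          simp only [List.length_cons] at hlen; omega
        rw [ih _ hrlen]
        congr 1
        by_cases hc : ((1 + (xs.takeWhile (fun y => y == x)).length : Nat) : Int)
            > (d.getD x ((0 : Int), (0 : Int))).2
        · rw [if_pos hc]
          by_cases hk : x = k
          · subst hk
            rw [if_pos ⟨rfl, hc⟩, PySem.Dict.getD_insert_self]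
          · rw [if_neg (fun hc2 => hk hc2.1), PySem.Dict.getD_insert, if_neg (Ne.symm hk)]
        · rw [if_neg hc, if_neg (fun hc2 => hc (by cases hc2.1; exact hc2.2))]

-- A's dict loop only overwrites keys already present: keys are preserved
lemma keys_pyALoop (n : Nat) : ∀ (levels : List Int), levels.length ≤ n →
    ∀ (d : PySem.Dict Int (Int × Int)) (pos : Int), (∀ x ∈ levels, d.contains x = true) →
    (pyALoop d pos levels).keys = d.keys := by
  induction n with
  | zero =>
      intro levels hlen d pos _
      have : levels = [] := by cases levels with
        | nil => rfl
        | cons a l => simp at hlen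
      subst this; simp [pyALoop]
  | succ n ih =>
      intro levels hlen d pos hmem
      match levels with
      | [] => simp [pyALoop]
      | x :: xs =>
        rw [pyALoop]
        have hrlen : (xs.dropWhile (fun y => y == x)).length ≤ n := by
          have := List.length_dropWhile_le (fun y => y == x) xs
          simp only [List.length_cons] at hlen; omega
        have hx : d.contains x = true := hmem x (by simp)
        by_cases hc : ((1 + (xs.takeWhile (fun y => y == x)).length : Nat) : Int)
            > (d.getD x ((0 : Int), (0 : Int))).2
        · simp only [hc, if_true]
          rw [ih _ hrlen]
          · exact PySem.Dict.keys_insert_of_contains _ _ hx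
          · intro y hy
            rw [PySem.Dict.contains_insert]
            have : y ∈ xs := (xs.dropWhile_sublist (p := fun y => y == x)).mem hy
            simp [hmem y (by simp [this])]
        · simp only [hc, if_false]
          exact ih _ hrlen d _ (fun y hy =>
            hmem y (by simpa using Or.inr ((xs.dropWhile_sublist (p := fun y => y == x)).mem hy)))

-- the init dict {level: (0,0) …} answers (0,0) to every getD with default (0,0)
lemma getD_init (l : List Int) : ∀ (d : PySem.Dict Int (Int × Int)),
    (∀ k, d.getD k ((0 : Int), (0 : Int)) = ((0 : Int), (0 : Int))) →
    ∀ k, (l.foldl (fun d t => d.insert t ((0 : Int), (0 : Int))) d).getD k ((0 : Int), (0 : Int))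
      = ((0 : Int), (0 : Int)) := by
  induction l with
  | nil => intro d h k; simpa using h k
  | cons a l ih =>
      intro d h k
      simp only [List.foldl_cons]
      refine ih _ (fun j => ?_) k
      rw [PySem.Dict.getD_insert]
      split_ifs <;> simp [h j]

-- B's inner scan across a run of elements ≠ level: best untouched, run counter reset
lemma bStep_ne (k x : Int) (hx : x ≠ k) (best : Int × Int) (hb : 0 ≤ best.2)
    (run p : Int) : pyBStep k (best, run) (p, x) = (best, 0) := by
  simp only [pyBStep]
  have hbx : (x == k) = false := by simpa using hx
  simp only [hbx, Bool.false_eq_true, if_false]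
  rw [if_neg (by omega)]

lemma bRun_ne (k x : Int) (hx : x ≠ k) : ∀ (L : Nat) (pos : Int) (best : Int × Int)
    (run : Int), 0 ≤ best.2 →
    (PySem.List.enumerate (List.replicate (L + 1) x) pos).foldl (pyBStep k) (best, run)
      = (best, 0) := by
  intro L
  induction L with
  | zero =>
      intro pos best run hb
      rw [List.replicate_one, PySem.List.enumerate_cons, List.foldl_cons,
        bStep_ne k x hx best hb run pos]
      simp [PySem.List.enumerate_nil]
  | succ L ih =>
      intro pos best run hb
      rw [List.replicate_succ, PySem.List.enumerate_cons, List.foldl_cons,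
        bStep_ne k x hx best hb run pos, ih (pos + 1) best 0 hb]

-- B's inner scan across a run of the level itself, entered with run counter 0
lemma bRun_eq (k : Int) : ∀ (L : Nat) (pos : Int) (best : Int × Int), 0 ≤ best.2 →
    (PySem.List.enumerate (List.replicate L k) pos).foldl (pyBStep k) (best, 0)
      = (if (L : Int) > best.2 then (pos, (L : Int)) else best, (L : Int)) := by
  intro L
  induction L with
  | zero =>
      intro pos best hb
      rw [if_neg (by omega)]
      simp only [List.replicate_zero, PySem.List.enumerate_nil, List.foldl_nil, Nat.cast_zero]
  | succ L ih =>
      intro pos best hb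
      rw [List.replicate_succ', PySem.List.enumerate_append, List.foldl_append, ih pos best hb]
      simp only [List.length_replicate, PySem.List.enumerate_cons, PySem.List.enumerate_nil,
        List.foldl_cons, List.foldl_nil, pyBStep, beq_self_eq_true, if_true]
      by_cases h1 : (L : Int) > best.2
      · rw [if_pos h1]
        rw [if_pos (by omega), if_pos (by push_cast; omega)]
        rw [Prod.mk.injEq, Prod.mk.injEq]
        refine ⟨⟨by ring, by push_cast; ring⟩, by push_cast; ring⟩
      · rw [if_neg h1]
        by_cases h2 : ((L : Int) + 1) > best.2
        · rw [if_pos (by omega), if_pos (by push_cast; omega)]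
          rw [Prod.mk.injEq, Prod.mk.injEq]
          refine ⟨⟨by ring, by push_cast; ring⟩, by push_cast; ring⟩
        · rw [if_neg (by omega), if_neg (by push_cast; omega)]
          rw [Prod.mk.injEq]
          refine ⟨rfl, by push_cast; ring⟩

-- main invariant: B's single scan for key k computes A's per-key projection aKey
lemma bestFor_eq_aKey (n : Nat) : ∀ (levels : List Int), levels.length ≤ n →
    ∀ (k pos : Int) (best : Int × Int) (run : Int), 0 ≤ best.2 →
    (levels.head? = some k → run = 0) →
    ((PySem.List.enumerate levels pos).foldl (pyBStep k) (best, run)).1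
      = aKey k pos best levels := by
  induction n with
  | zero =>
      intro levels hlen k pos best run hb _
      have : levels = [] := by cases levels with
        | nil => rfl
        | cons a l => simp at hlen
      subst this; simp [PySem.List.enumerate_nil, aKey]
  | succ n ih =>
      intro levels hlen k pos best run hb hrun
      match levels with
      | [] => simp [PySem.List.enumerate_nil, aKey]
      | x :: xs =>
        set g := xs.takeWhile (fun y => y == x) with hg
        set r := xs.dropWhile (fun y => y == x) with hr
        have hk : g = List.replicate g.length x := takeWhile_eq_replicate x xs
        have hxsplit : x :: xs = List.replicate (g.length + 1) x ++ r := by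
          rw [List.replicate_succ, List.cons_append, ← hk, hg, hr,
            List.takeWhile_append_dropWhile]
        have hrlen : r.length ≤ n := by
          have h5 := List.length_dropWhile_le (fun y => y == x) xs
          rw [← hr] at h5
          simp only [List.length_cons] at hlen
          omega
        have hrne : ∀ z, r.head? = some z → z ≠ x := fun z hz =>
          head?_dropWhile_ne x xs z (by rw [← hr]; exact hz)
        have hcast : ((1 + g.length : Nat) : Int) = ((g.length + 1 : Nat) : Int) := by
          push_cast; ring
        rw [aKey]
        simp only [← hg, ← hr, hcast]
        conv_lhs => rw [hxsplit]
        rw [PySem.List.enumerate_append, List.foldl_append, List.length_replicate]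
        by_cases hxk : x = k
        · subst hxk
          have hrun0 : run = 0 := hrun rfl
          subst hrun0
          rw [bRun_eq x (g.length + 1) pos best hb]
          have hif : (if x = x ∧ ((g.length + 1 : Nat) : Int) > best.2 then
                (pos, ((g.length + 1 : Nat) : Int)) else best)
              = (if ((g.length + 1 : Nat) : Int) > best.2 then
                (pos, ((g.length + 1 : Nat) : Int)) else best) := by
            by_cases h : ((g.length + 1 : Nat) : Int) > best.2
            · rw [if_pos ⟨rfl, h⟩, if_pos h]
            · rw [if_neg (fun hc => h hc.2), if_neg h]
          rw [hif]
          have hb' : 0 ≤ (if ((g.length + 1 : Nat) : Int) > best.2 then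
              (pos, ((g.length + 1 : Nat) : Int)) else best).2 := by
            split_ifs with h
            · exact Int.natCast_nonneg _
            · exact hb
          exact ih r hrlen x (pos + ((g.length + 1 : Nat) : Int)) _ _ hb'
            (fun hh => absurd rfl (hrne x hh))
        · rw [bRun_ne k x hxk g.length pos best run hb]
          rw [if_neg (fun hc2 => hxk hc2.1)]
          exact ih r hrlen k (pos + ((g.length + 1 : Nat) : Int)) best 0 hb (fun _ => rfl)

-- ===== VERDICT (by name: the statement is the Claim_ definition above) =====
theorem find_longest_segments_spec : Claim_equal_find_longest_segments := by
  intro levels _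
  unfold Spec_find_longest_segments find_longest_segments find_longest_segments_alt
  set S := PySem.Set.ofList levels with hS
  set init := S.foldl (fun d l => d.insert l ((0 : Int), (0 : Int))) PySem.Dict.empty with hinit
  have hkeysInit : init.keys = S := by
    rw [hinit, PySem.Dict.keys_foldl_insert (f := fun _ _ => ((0 : Int), (0 : Int)))]
    rw [PySem.Dict.keys_empty, PySem.Set.update_nil_left]
    exact PySem.Set.ofList_eq_self_of_nodup _ (PySem.Set.nodup_ofList levels)
  have hcont : ∀ x ∈ levels, init.contains x = true := by
    intro x hx
    rw [PySem.Dict.contains_iff_mem_keys, hkeysInit, hS]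
    exact (PySem.Set.mem_ofList _ _).2 hx
  have hkeysF : (pyALoop init 0 levels).keys = S := by
    rw [keys_pyALoop levels.length levels le_rfl init 0 hcont, hkeysInit]
  have hnodupF : (pyALoop init 0 levels).keys.Nodup := by
    rw [hkeysF]; exact PySem.Set.nodup_ofList levels
  rw [PySem.Dict.items_eq_map_keys _ hnodupF ((0 : Int), (0 : Int)), hkeysF]
  have hB : (S.foldl (fun d l => d.insert l (pyBBest levels l)) PySem.Dict.empty).items
      = PySem.Dict.empty.items ++ S.map (fun a => (a, pyBBest levels a)) :=
    PySem.Dict.items_foldl_insert_fresh S (fun a => a) (fun a => pyBBest levels a) _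
      (fun a _ => PySem.Dict.contains_empty a)
      (by rw [hS]; simp [PySem.Set.nodup_ofList levels])
  rw [hB, show (PySem.Dict.empty : PySem.Dict Int (Int × Int)).items = [] from rfl,
    List.nil_append]
  refine List.map_congr_left (fun k _ => ?_)
  rw [getD_pyALoop levels.length levels le_rfl init 0 k]
  have hinit0 : init.getD k ((0 : Int), (0 : Int)) = ((0 : Int), (0 : Int)) := by
    rw [hinit]
    exact getD_init S PySem.Dict.empty (fun j => PySem.Dict.getD_empty j _) k
  rw [hinit0, Prod.mk.injEq]
  exact ⟨rfl, (bestFor_eq_aKey levels.length levels le_rfl k 0 ((0 : Int), (0 : Int)) 0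
    (le_refl 0) (fun _ => rfl)).symm⟩
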